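-- pv_equiv track=rewrite | github.com/Muizzkolapo/agent-actions | agent_actions/tooling/lsp/utils.py | is_in_context_scope_list
-- ===== SOURCE A (Python) =====
-- def is_in_context_scope_list(lines: list[str], current_line: int) -> bool:
--     """Check if current line is within a context_scope observe/drop/passthrough list."""
--     current_indent = len(lines[current_line]) - len(lines[current_line].lstrip())
--     list_block_indent = None
--
--     for i in range(current_line - 1, -1, -1):
--         line = lines[i]
--         if not line.strip():
--             continue
--         line_indent = len(line) - len(line.lstrip())
--
--         if list_block_indent is None and line_indent < current_indent:
--             if line.strip().startswith(("observe:", "drop:", "passthrough:")):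
--                 list_block_indent = line_indent
--                 current_indent = line_indent
--                 continue
--
--         if list_block_indent is not None and line_indent < list_block_indent:
--             return line.strip().startswith("context_scope:")
--
--     return False
-- ===== SOURCE B (Python) =====
-- def is_in_context_scope_list(lines: list[str], current_line: int) -> bool:
--     """Check if current line is within a context_scope observe/drop/passthrough list."""
--     current_indent = len(lines[current_line]) - len(lines[current_line].lstrip())
--
--     # Single forward pass with a monotone indentation stack: for every non-blank
--     # line, the stack top (after popping indents >= this line's) is its parent.
--     # The last observe:/drop:/passthrough: header less indented than the current
--     # line decides; it is inside a context_scope list iff its parent starts with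
--     # "context_scope:".
--     stack = []  # (indent, stripped line), strictly increasing indents
--     answer = False
--     for i in range(current_line):
--         line = lines[i]
--         s = line.strip()
--         if not s:
--             continue
--         ind = len(line) - len(line.lstrip())
--         while stack and stack[-1][0] >= ind:
--             stack.pop()
--         if ind < current_indent and s.startswith(
--             ("observe:", "drop:", "passthrough:")
--         ):
--             answer = bool(stack) and stack[-1][1].startswith("context_scope:")
--         stack.append((ind, s))
--     return answer
-- ===== Notes on version B (the rewrite author's own statement) =====
-- stated objective: alternative
-- what changed: A's backward scan (find the enclosing list header, then keep scanning up for its less-indented parent) is replaced by a single forward pass over the preceding lines that maintains a monotone indentation stack, so each header's parent is read off the stack top instead of being searched for.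
import Mathlib
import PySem

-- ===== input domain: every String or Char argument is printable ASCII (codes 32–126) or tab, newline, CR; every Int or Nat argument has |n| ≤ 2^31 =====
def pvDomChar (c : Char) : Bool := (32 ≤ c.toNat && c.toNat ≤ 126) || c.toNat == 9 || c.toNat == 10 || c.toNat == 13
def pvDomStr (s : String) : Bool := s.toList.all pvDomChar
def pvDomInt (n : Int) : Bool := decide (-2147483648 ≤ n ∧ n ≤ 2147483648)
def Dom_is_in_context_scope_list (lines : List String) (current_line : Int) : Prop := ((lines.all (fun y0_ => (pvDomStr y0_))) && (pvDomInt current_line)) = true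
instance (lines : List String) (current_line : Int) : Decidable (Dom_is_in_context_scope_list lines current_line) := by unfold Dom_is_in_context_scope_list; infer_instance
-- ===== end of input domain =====

-- B replaces A's backward scan by a single forward pass with a monotone indentation
-- stack: the stack top after popping indents >= the line's is the line's parent.


-- ===== PORT A =====

-- indentation = len(line) - len(line.lstrip())
def pvIndent (line : String) : Int :=
  PySem.Str.len line - PySem.Str.len (PySem.Str.lstrip line)

-- startswith(("observe:", "drop:", "passthrough:"))
def pvKw (s : String) : Bool :=
  PySem.Str.startswith s "observe:" || PySem.Str.startswith s "drop:" ||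
    PySem.Str.startswith s "passthrough:"

-- A's for-loop over i = current_line-1, …, 0, carrying (current_indent, list_block_indent)
def pvLoopA (lines : List String) (i : Nat) (ci : Int) (lbi : Option Int) : Bool :=
  let line := lines.getD i ""
  let kont : Int → Option Int → Bool := fun ci' lbi' =>
    if i = 0 then false else pvLoopA lines (i - 1) ci' lbi'
  if PySem.Str.strip line = "" then kont ci lbi
  else
    let li := pvIndent line
    if lbi = none ∧ li < ci ∧ pvKw (PySem.Str.strip line) then
      kont li (some li)
    else
      match lbi with
      | some b =>
          if li < b then PySem.Str.startswith (PySem.Str.strip line) "context_scope:"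
          else kont ci (some b)
      | none => kont ci none

def is_in_context_scope_list (lines : List String) (current_line : Int) : Bool :=
  let ci := pvIndent ((PySem.List.pyGet? lines current_line).getD "")
  if current_line - 1 < 0 then false
  else pvLoopA lines (current_line - 1).toNat ci none

-- ===== PORT B =====

-- while stack and stack[-1][0] >= ind: stack.pop()   (head of the list = stack top)
def pvPop (stack : List (Int × String)) (ind : Int) : List (Int × String) :=
  match stack with
  | [] => []
  | (b, s) :: rest => if ind ≤ b then pvPop rest ind else (b, s) :: rest

-- bool(stack) and stack[-1][1].startswith("context_scope:")
def pvCtxTop (stack : List (Int × String)) : Bool :=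
  match stack with
  | [] => false
  | (_, t) :: _ => PySem.Str.startswith t "context_scope:"

-- one iteration of B's forward loop, state = (stack, answer)
def pvStepB (ci : Int) (st : List (Int × String) × Bool) (line : String) :
    List (Int × String) × Bool :=
  let s := PySem.Str.strip line
  if s = "" then st
  else
    let ind := pvIndent line
    let stack := pvPop st.1 ind
    let ans := if ind < ci ∧ pvKw s then pvCtxTop stack else st.2
    ((ind, s) :: stack, ans)

def is_in_context_scope_list_alt (lines : List String) (current_line : Int) : Bool :=
  let ci := pvIndent ((PySem.List.pyGet? lines current_line).getD "")
  let pre := if current_line ≤ 0 then [] else lines.take current_line.toNat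
  (pre.foldl (pvStepB ci) ([], false)).2

-- ===== PRECONDITION & SPEC =====
-- Python raises IndexError on lines[current_line] out of range; both programs raise there.
def Pre_is_in_context_scope_list (lines : List String) (current_line : Int) : Prop :=
  PySem.Raise.InRange lines.length current_line
instance (lines : List String) (current_line : Int) : Decidable (Pre_is_in_context_scope_list lines current_line) := by unfold Pre_is_in_context_scope_list; infer_instance

def pvWitness_is_in_context_scope_list : List String × Int :=
  (["context_scope:", "  observe:", "    - a"], 2)

def Spec_is_in_context_scope_list (lines : List String) (current_line : Int) (out : Bool) : Prop := out = is_in_context_scope_list_alt lines current_line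
instance (lines : List String) (current_line : Int) (out : Bool) : Decidable (Spec_is_in_context_scope_list lines current_line out) := by unfold Spec_is_in_context_scope_list; infer_instance

-- ===== CLAIM (what is proved, stated in full; the proofs are below) =====
def Claim_equal_is_in_context_scope_list : Prop := ∀ (lines : List String) (current_line : Int), Dom_is_in_context_scope_list lines current_line → Pre_is_in_context_scope_list lines current_line → Spec_is_in_context_scope_list lines current_line (is_in_context_scope_list lines current_line)

-- ===== LEMMAS AND PROOFS =====

-- reference backward functions on the REVERSED prefix (head = line closest to current_line)
def pvBwd2 (b : Int) : List String → Bool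
  | [] => false
  | x :: rest =>
      if PySem.Str.strip x = "" then pvBwd2 b rest
      else if pvIndent x < b then PySem.Str.startswith (PySem.Str.strip x) "context_scope:"
      else pvBwd2 b rest

def pvBwd1 (ci : Int) : List String → Bool
  | [] => false
  | x :: rest =>
      if PySem.Str.strip x = "" then pvBwd1 ci rest
      else if pvIndent x < ci ∧ pvKw (PySem.Str.strip x) then pvBwd2 (pvIndent x) rest
      else pvBwd1 ci rest

theorem pvPop_pop (a b : Int) (h : b ≤ a) :
    ∀ st : List (Int × String), pvPop (pvPop st a) b = pvPop st b := by
  intro st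
  induction st with
  | nil => rfl
  | cons p rest ih =>
    obtain ⟨c, s⟩ := p
    by_cases hc : a ≤ c
    · rw [pvPop, if_pos hc, ih, pvPop, if_pos (le_trans h hc)]
    · rw [pvPop, if_neg hc]

-- the fold over the forward prefix computes both backward reference functions
theorem pvFold_key (ci : Int) :
    ∀ L : List String,
      ((L.foldl (pvStepB ci) ([], false)).2 = pvBwd1 ci L.reverse) ∧
      (∀ b, pvBwd2 b L.reverse = pvCtxTop (pvPop (L.foldl (pvStepB ci) ([], false)).1 b)) := by
  intro L
  induction L using List.reverseRecOn with
  | nil => exact ⟨rfl, fun b => rfl⟩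
  | append_singleton L x ih =>
    rw [List.foldl_append, List.reverse_append]
    simp only [List.foldl_cons, List.foldl_nil, List.reverse_singleton, List.singleton_append]
    rw [pvStepB]
    by_cases hb : PySem.Str.strip x = ""
    · rw [if_pos hb]
      constructor
      · rw [pvBwd1, if_pos hb]; exact ih.1
      · intro b; rw [pvBwd2, if_pos hb]; exact ih.2 b
    · rw [if_neg hb]
      constructor
      · rw [pvBwd1, if_neg hb]
        by_cases hk : pvIndent x < ci ∧ pvKw (PySem.Str.strip x) = true
        · rw [if_pos hk]
          show (if pvIndent x < ci ∧ pvKw (PySem.Str.strip x) then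
              pvCtxTop (pvPop (L.foldl (pvStepB ci) ([], false)).1 (pvIndent x))
            else (L.foldl (pvStepB ci) ([], false)).2) = _
          rw [if_pos hk]
          exact (ih.2 (pvIndent x)).symm
        · rw [if_neg hk]
          show (if pvIndent x < ci ∧ pvKw (PySem.Str.strip x) then
              pvCtxTop (pvPop (L.foldl (pvStepB ci) ([], false)).1 (pvIndent x))
            else (L.foldl (pvStepB ci) ([], false)).2) = _
          rw [if_neg hk]
          exact ih.1
      · intro b
        rw [pvBwd2, if_neg hb]
        by_cases hlt : pvIndent x < b
        · rw [if_pos hlt]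
          show _ = pvCtxTop (pvPop ((pvIndent x, PySem.Str.strip x) :: _) b)
          rw [pvPop, if_neg (by omega : ¬ b ≤ pvIndent x)]
          rfl
        · rw [if_neg hlt]
          show pvBwd2 b L.reverse = pvCtxTop (pvPop ((pvIndent x, PySem.Str.strip x) ::
              pvPop (L.foldl (pvStepB ci) ([], false)).1 (pvIndent x)) b)
          rw [pvPop, if_pos (by omega : b ≤ pvIndent x),
            pvPop_pop (pvIndent x) b (by omega)]
          exact ih.2 b

-- A's indexed backward loop computes the backward reference functions on the prefix
theorem pvLoopA_key (lines : List String) :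
    ∀ i : Nat, i < lines.length → ∀ ci : Int,
      (pvLoopA lines i ci none = pvBwd1 ci (lines.take (i + 1)).reverse) ∧
      (∀ b, pvLoopA lines i ci (some b) = pvBwd2 b (lines.take (i + 1)).reverse) := by
  intro i
  induction i using Nat.strong_induction_on with
  | _ i ih =>
    intro hi ci
    have hx : lines.getD i "" = lines[i] := List.getD_eq_getElem lines "" hi
    have htake : (lines.take (i + 1)).reverse = lines[i] :: (lines.take i).reverse := by
      rw [List.take_add_one, List.reverse_append]
      simp [hi]
    have hbase : i = 0 → (lines.take i).reverse = ([] : List String) := by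
      intro h0; simp [h0]
    constructor
    · rw [pvLoopA, htake, pvBwd1]
      simp only [hx]
      by_cases hb : PySem.Str.strip lines[i] = ""
      · rw [if_pos hb, if_pos hb]
        by_cases h0 : i = 0
        · simp [h0, pvBwd1]
        · rw [if_neg h0, (ih (i - 1) (by omega) (by omega) ci).1,
            show i - 1 + 1 = i from by omega]
      · rw [if_neg hb, if_neg hb]
        by_cases hk : pvIndent lines[i] < ci ∧ pvKw (PySem.Str.strip lines[i]) = true
        · rw [if_pos (⟨trivial, hk.1, hk.2⟩ : True ∧ _ ∧ _), if_pos hk]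
          by_cases h0 : i = 0
          · simp [h0, pvBwd2]
          · rw [if_neg h0, (ih (i - 1) (by omega) (by omega) (pvIndent lines[i])).2,
              show i - 1 + 1 = i from by omega]
        · have hA : ¬ (True ∧ pvIndent lines[i] < ci ∧
              pvKw (PySem.Str.strip lines[i]) = true) := fun h => hk ⟨h.2.1, h.2.2⟩
          rw [if_neg hA, if_neg hk]
          by_cases h0 : i = 0
          · simp [h0, pvBwd1]
          · rw [if_neg h0, (ih (i - 1) (by omega) (by omega) ci).1,
              show i - 1 + 1 = i from by omega]
    · intro b
      rw [pvLoopA, htake, pvBwd2]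
      simp only [hx]
      by_cases hb : PySem.Str.strip lines[i] = ""
      · rw [if_pos hb, if_pos hb]
        by_cases h0 : i = 0
        · simp [h0, pvBwd2]
        · rw [if_neg h0, (ih (i - 1) (by omega) (by omega) ci).2 b,
            show i - 1 + 1 = i from by omega]
      · rw [if_neg hb, if_neg hb]
        rw [if_neg (by simp : ¬ ((some b : Option Int) = none ∧ pvIndent lines[i] < ci ∧
          pvKw (PySem.Str.strip lines[i]) = true))]
        by_cases hlt : pvIndent lines[i] < b
        · rw [if_pos hlt, if_pos hlt]
        · rw [if_neg hlt, if_neg hlt]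
          by_cases h0 : i = 0
          · simp [h0, pvBwd2]
          · rw [if_neg h0, (ih (i - 1) (by omega) (by omega) ci).2 b,
              show i - 1 + 1 = i from by omega]

-- ===== VERDICT (by name: the statement is the Claim_ definition above) =====
theorem is_in_context_scope_list_spec : Claim_equal_is_in_context_scope_list := by
  intro lines current_line _ hpre
  unfold Spec_is_in_context_scope_list is_in_context_scope_list is_in_context_scope_list_alt
  simp only
  by_cases hneg : current_line - 1 < 0
  · rw [if_pos hneg, if_pos (by omega : current_line ≤ 0)]
    rfl
  · rw [if_neg hneg, if_neg (by omega : ¬ current_line ≤ 0)]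
    have hlt : current_line < lines.length := by
      have := hpre
      unfold Pre_is_in_context_scope_list PySem.Raise.InRange at this
      omega
    have hi : (current_line - 1).toNat < lines.length := by omega
    have htn : current_line.toNat = (current_line - 1).toNat + 1 := by omega
    rw [(pvLoopA_key lines (current_line - 1).toNat hi _).1, htn]
    exact ((pvFold_key _ (lines.take ((current_line - 1).toNat + 1))).1).symm
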